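-- pv_equiv track=rewrite | github.com/karrlopezz/dsc20_HW | hw03.py | new_orders
-- ===== SOURCE A (Python) =====
-- def new_orders(orders, action, dish_name, amount):
--     """
--     Creates dictionary with updated values for dishes
--     --
--     Parameters:
--     order: dictionary where keys are strings and values are positive
--     integers
--     action: string of either 'add' or 'remove'
--     dish_name: dish name that need to be updated (string)
--     amount: amount dish needs to be updated (non-negative integer)
--     --
--     Returns:
--     updated dictionary with new amount for given dish name in paremeter
--
--     >>> orders = {'pizza': 10, 'burger': 5}
--     >>> new_orders(orders, 'add', 'pizza', 5)
--     {'pizza': 15, 'burger': 5}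
--
--     >>> new_orders(orders, 'remove', 'burger', 3)
--     {'pizza': 10, 'burger': 2}
--
--     >>> new_orders(orders, 'remove', 'pizza', 15)
--     {'pizza': 0, 'burger': 5}
--
--     >>> new_orders([], 'remove', 'burger', 3)
--     Traceback (most recent call last):
--     ...
--     AssertionError
--
--     >>> new_orders(orders, 'add', 'burger', 20)
--     {'pizza': 10, 'burger': 25}
--
--     >>> new_orders(orders, 'remove', 'fries', 3)
--     Traceback (most recent call last):
--     ...
--     AssertionError
--
--     >>> new_orders(orders, 'add', 'pizza', -5)
--     Traceback (most recent call last):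
--     ...
--     AssertionError
--     """
--     assert isinstance(orders, dict)
--     assert all(isinstance(keys, str) for keys in orders.keys())
--     assert all(isinstance(vals, int) for vals in orders.values())
--     assert dish_name in orders.keys()
--     assert amount >= 0
--     return {dish: (val + amount if dish == dish_name and
--      action == 'add' else max(0, val - amount) if dish == dish_name
--       and action == 'remove' else val) for dish, val in orders.items()}
-- ===== SOURCE B (Python) =====
-- def new_orders(orders, action, dish_name, amount):
--     assert isinstance(orders, dict)
--     assert all(isinstance(keys, str) for keys in orders.keys())
--     assert all(isinstance(vals, int) for vals in orders.values())
--     assert dish_name in orders.keys()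
--     assert amount >= 0
--     items = list(orders.items())
--     keys = [k for k, _ in items]
--     i = keys.index(dish_name)
--     val = items[i][1]
--     if action == 'add':
--         val = val + amount
--     elif action == 'remove':
--         val = max(0, val - amount)
--     return dict(items[:i] + [(dish_name, val)] + items[i+1:])
-- ===== Notes on version B (the rewrite author's own statement) =====
-- stated objective: alternative
-- what changed: Instead of A's per-element conditional comprehension over the whole dict, B locates the single affected entry by index (keys.index), computes its new value once, and rebuilds the dict by slicing: unchanged prefix + updated pair + unchanged suffix.
import Mathlib
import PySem

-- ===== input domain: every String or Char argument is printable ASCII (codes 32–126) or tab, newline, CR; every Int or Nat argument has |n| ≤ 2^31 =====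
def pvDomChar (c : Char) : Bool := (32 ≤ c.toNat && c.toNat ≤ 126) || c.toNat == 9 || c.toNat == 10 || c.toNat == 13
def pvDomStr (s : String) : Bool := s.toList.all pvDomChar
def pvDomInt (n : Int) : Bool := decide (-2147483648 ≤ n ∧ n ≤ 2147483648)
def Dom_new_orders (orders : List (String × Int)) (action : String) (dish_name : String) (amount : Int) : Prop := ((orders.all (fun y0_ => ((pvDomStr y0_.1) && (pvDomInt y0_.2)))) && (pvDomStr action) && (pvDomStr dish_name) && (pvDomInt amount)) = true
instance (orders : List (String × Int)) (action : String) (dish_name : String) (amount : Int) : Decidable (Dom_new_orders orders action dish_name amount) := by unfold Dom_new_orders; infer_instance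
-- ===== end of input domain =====

-- B locates the one affected entry by keys.index and rebuilds the dict by slicing
-- (prefix + updated pair + suffix) instead of A's conditional comprehension over every item
-- (objective: alternative).

-- ===== PORT A =====
-- the dict comprehension: one pass over all items, conditionally rewriting each value
def new_orders (orders : List (String × Int)) (action : String) (dish_name : String) (amount : Int) : List (String × Int) :=
  orders.map (fun p =>
    (p.1, if p.1 = dish_name ∧ action = "add" then p.2 + amount
          else if p.1 = dish_name ∧ action = "remove" then max 0 (p.2 - amount)
          else p.2))

-- ===== PORT B =====
-- items = list(orders.items()); i = keys.index(dish_name); val = items[i][1]; branch on action;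
-- result = items[:i] + [(dish_name, val)] + items[i+1:].  keys.index raises ValueError when the
-- dish is absent, but A's assert has already excluded that (outside Pre_); the none branch is unreachable.
def new_orders_alt (orders : List (String × Int)) (action : String) (dish_name : String) (amount : Int) : List (String × Int) :=
  let keys := orders.map Prod.fst
  match PySem.List.index? keys dish_name with
  | none => []
  | some i =>
    let val := ((PySem.List.pyGet? orders (i : Int)).getD ("", 0)).2
    let val := if action = "add" then val + amount
               else if action = "remove" then max 0 (val - amount)
               else val
    PySem.List.slice orders none (some (i : Int)) ++ [(dish_name, val)] ++
      PySem.List.slice orders (some ((i : Int) + 1)) none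

-- ===== PRECONDITION & SPEC =====
-- A asserts dish_name ∈ orders and 0 ≤ amount (AssertionError otherwise).  The Nodup
-- condition only says the association list really represents a Python dict (the argument
-- type in Python): duplicate keys are unrepresentable in a dict, so nothing A can receive is excluded.
def Pre_new_orders (orders : List (String × Int)) (action : String) (dish_name : String) (amount : Int) : Prop :=
  dish_name ∈ orders.map Prod.fst ∧ 0 ≤ amount ∧ (orders.map Prod.fst).Nodup
instance (orders : List (String × Int)) (action : String) (dish_name : String) (amount : Int) : Decidable (Pre_new_orders orders action dish_name amount) := by unfold Pre_new_orders; infer_instance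
def pvWitness_new_orders : (List (String × Int)) × String × String × Int := ([("pizza", 10), ("burger", 5)], "add", "pizza", 5)
def Spec_new_orders (orders : List (String × Int)) (action : String) (dish_name : String) (amount : Int) (out : List (String × Int)) : Prop := out = new_orders_alt orders action dish_name amount
instance (orders : List (String × Int)) (action : String) (dish_name : String) (amount : Int) (out : List (String × Int)) : Decidable (Spec_new_orders orders action dish_name amount out) := by unfold Spec_new_orders; infer_instance

-- ===== CLAIM (what is proved, stated in full; the proofs are below) =====
def Claim_equal_new_orders : Prop := ∀ (orders : List (String × Int)) (action : String) (dish_name : String) (amount : Int), Dom_new_orders orders action dish_name amount → Pre_new_orders orders action dish_name amount → Spec_new_orders orders action dish_name amount (new_orders orders action dish_name amount)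

-- ===== LEMMAS AND PROOFS =====

-- B's splice at the first (and, by Nodup, only) occurrence of the dish equals the full
-- conditional map, for any update function f of the one value.
lemma splice_eq_map (dish : String) (f : Int → Int) :
    ∀ (orders : List (String × Int)),
    dish ∈ orders.map Prod.fst → (orders.map Prod.fst).Nodup →
    (match PySem.List.index? (orders.map Prod.fst) dish with
     | none => []
     | some i =>
       PySem.List.slice orders none (some (i : Int)) ++
         [(dish, f (((PySem.List.pyGet? orders (i : Int)).getD ("", 0)).2))] ++
         PySem.List.slice orders (some ((i : Int) + 1)) none)
      = orders.map (fun p => if p.1 = dish then (dish, f p.2) else p) := by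
  intro orders
  induction orders with
  | nil => intro h _; simp at h
  | cons a t ih =>
    intro hmem hnd
    simp only [List.map_cons, List.nodup_cons] at hnd
    by_cases hk : a.1 = dish
    · have h0 : PySem.List.index? ((a :: t).map Prod.fst) dish = some 0 := by
        simpa [hk] using PySem.List.index?_cons_self dish (t.map Prod.fst)
      have hrest : t.map (fun p => if p.1 = dish then (dish, f p.2) else p) = t := by
        conv_rhs => rw [← List.map_id t]
        refine List.map_congr_left fun p hp => ?_
        have : ¬ p.1 = dish := fun he => hnd.1 (hk ▸ he ▸ List.mem_map_of_mem hp)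
        simp [this]
      rw [h0]
      dsimp only
      rw [show ((0 : Nat) : Int) = 0 from rfl, PySem.List.slice_to _ le_rfl,
        PySem.List.pyGet?_zero_cons, PySem.List.slice_from _ (by norm_num)]
      simp [hk, hrest]
    · have hmem' : dish ∈ t.map Prod.fst := by
        simp only [List.map_cons, List.mem_cons] at hmem
        exact hmem.resolve_left (fun h => hk h.symm)
      obtain ⟨i, hi⟩ := Option.isSome_iff_exists.mp
        ((PySem.List.index?_isSome_iff (xs := t.map Prod.fst) (v := dish)).2 hmem')
      have hcons : PySem.List.index? ((a :: t).map Prod.fst) dish = some (i + 1) := by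
        rw [List.map_cons, PySem.List.index?_cons_of_ne _ hk, hi]; rfl
      have iht := ih hmem' hnd.2
      rw [hi] at iht
      dsimp only at iht
      have e1 : PySem.List.slice (a :: t) none (some ((i + 1 : Nat) : Int))
          = a :: PySem.List.slice t none (some (i : Int)) := by
        rw [PySem.List.slice_to_natCast, PySem.List.slice_to_natCast, List.take_succ_cons]
      have e2 : PySem.List.pyGet? (a :: t) ((i + 1 : Nat) : Int) = PySem.List.pyGet? t (i : Int) := by
        simp [PySem.List.pyGet?_natCast]
      have e3 : PySem.List.slice (a :: t) (some (((i + 1 : Nat) : Int) + 1)) none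
          = PySem.List.slice t (some ((i : Int) + 1)) none := by
        have h1 : (((i + 1 : Nat) : Int) + 1) = ((i + 2 : Nat) : Int) := by push_cast; ring
        have h2 : ((i : Int) + 1) = ((i + 1 : Nat) : Int) := by push_cast; ring
        rw [h1, h2, PySem.List.slice_from_natCast, PySem.List.slice_from_natCast,
          List.drop_succ_cons]
      rw [hcons]
      dsimp only
      rw [e1, e2, e3, List.map_cons, if_neg hk]
      simp only [List.cons_append]
      exact congrArg _ iht

-- ===== VERDICT (by name: the statement is the Claim_ definition above) =====
theorem new_orders_spec : Claim_equal_new_orders := by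
  intro orders action dish_name amount _hdom hpre
  obtain ⟨hmem, _hamt, hnd⟩ := hpre
  unfold Spec_new_orders new_orders
  have halt : ∀ f : Int → Int,
      (if action = "add" then f = fun v => v + amount
       else if action = "remove" then f = fun v => max 0 (v - amount)
       else f = fun v => v) →
      new_orders_alt orders action dish_name amount
        = (match PySem.List.index? (orders.map Prod.fst) dish_name with
           | none => []
           | some i =>
             PySem.List.slice orders none (some (i : Int)) ++
               [(dish_name, f (((PySem.List.pyGet? orders (i : Int)).getD ("", 0)).2))] ++
               PySem.List.slice orders (some ((i : Int) + 1)) none) := by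
    intro f hf
    simp only [new_orders_alt]
    cases h : PySem.List.index? (orders.map Prod.fst) dish_name with
    | none => rfl
    | some i =>
      dsimp only
      by_cases hadd : action = "add"
      · rw [if_pos hadd] at hf ⊢; rw [hf]
      · rw [if_neg hadd] at hf ⊢
        by_cases hrem : action = "remove"
        · rw [if_pos hrem] at hf ⊢; rw [hf]
        · rw [if_neg hrem] at hf ⊢; rw [hf]
  by_cases hadd : action = "add"
  · rw [halt (fun v => v + amount) (by rw [if_pos hadd]),
      splice_eq_map dish_name (fun v => v + amount) orders hmem hnd]
    refine List.map_congr_left fun p _ => ?_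
    by_cases hp : p.1 = dish_name <;> simp [hp, hadd]
  · by_cases hrem : action = "remove"
    · rw [halt (fun v => max 0 (v - amount)) (by rw [if_neg hadd, if_pos hrem]),
        splice_eq_map dish_name (fun v => max 0 (v - amount)) orders hmem hnd]
      refine List.map_congr_left fun p _ => ?_
      by_cases hp : p.1 = dish_name <;> simp [hp, hrem]
    · rw [halt (fun v => v) (by rw [if_neg hadd, if_neg hrem]),
        splice_eq_map dish_name (fun v => v) orders hmem hnd]
      refine List.map_congr_left fun p _ => ?_
      by_cases hp : p.1 = dish_name <;> simp [hp, hadd, hrem]
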